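-- pv_equiv track=rewrite | github.com/GivenTimeOvO/EUUP | fcore/utils/misc.py | interleave_offsets
-- ===== SOURCE A (Python) =====
-- from typing import List, Sequence
--
-- def interleave_offsets(batch_size: int, num_unlabeled: int) -> List[int]:
--     # TODO: scrutiny
--     groups = [batch_size // (num_unlabeled + 1)] * (num_unlabeled + 1)
--     for x in range(batch_size - sum(groups)):
--         groups[-x - 1] += 1
--     offsets = [0]
--     for g in groups:
--         offsets.append(offsets[-1] + g)
--     assert offsets[-1] == batch_size
--     return offsets
-- ===== SOURCE B (Python) =====
-- def interleave_offsets(batch_size, num_unlabeled):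
--     q, r = divmod(batch_size, num_unlabeled + 1)
--     cut = num_unlabeled + 1 - r
--     return [q * k + max(0, k - cut) for k in range(num_unlabeled + 2)]
-- ===== Notes on version B (the rewrite author's own statement) =====
-- stated objective: simpler
-- what changed: replaces the groups array, the remainder-increment loop over it and the running-total accumulation with one closed-form comprehension offsets[k] = q*k + max(0, k - cut) over range(num_unlabeled+2)
-- outside the precondition, e.g. on interleave_offsets(0, -2): A returns [0], B returns []
import Mathlib
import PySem

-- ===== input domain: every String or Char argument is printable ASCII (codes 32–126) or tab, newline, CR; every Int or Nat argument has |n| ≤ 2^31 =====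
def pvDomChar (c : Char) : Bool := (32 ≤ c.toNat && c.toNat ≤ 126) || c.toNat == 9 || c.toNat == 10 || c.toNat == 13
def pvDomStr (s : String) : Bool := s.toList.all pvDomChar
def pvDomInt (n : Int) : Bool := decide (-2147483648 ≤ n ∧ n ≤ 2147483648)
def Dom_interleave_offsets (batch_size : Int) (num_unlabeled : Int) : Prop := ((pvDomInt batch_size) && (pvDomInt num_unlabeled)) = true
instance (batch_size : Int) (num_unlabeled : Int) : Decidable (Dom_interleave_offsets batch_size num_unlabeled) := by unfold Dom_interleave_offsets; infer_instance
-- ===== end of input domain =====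

-- B replaces A's groups array + remainder-increment loop + running-total accumulation by one
-- closed-form comprehension per offset (simpler decomposition); return values agree on num_unlabeled ≥ 0.

-- ===== PORT A =====
def interleave_offsets (batch_size : Int) (num_unlabeled : Int) : List Int :=
  let groups := PySem.List.pyRepeat [PySem.Int.floordiv batch_size (num_unlabeled + 1)] (num_unlabeled + 1)
  let groups := (PySem.List.pyRange 0 (batch_size - groups.sum) 1).foldl
    (fun g x => PySem.List.pySetD g (-x - 1) (PySem.List.pyGetD g (-x - 1) 0 + 1)) groups
  -- the assert 'offsets[-1] == batch_size' always holds under Pre_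
  groups.foldl (fun offsets g => offsets ++ [offsets.getLast! + g]) [0]

-- ===== PORT B =====
def interleave_offsets_alt (batch_size : Int) (num_unlabeled : Int) : List Int :=
  let q := PySem.Int.floordiv batch_size (num_unlabeled + 1)
  let r := PySem.Int.mod batch_size (num_unlabeled + 1)
  let cut := num_unlabeled + 1 - r
  (PySem.List.pyRange 0 (num_unlabeled + 2) 1).map (fun k => q * k + max 0 (k - cut))

-- ===== PRECONDITION & SPEC =====
-- Pre_ restricts to the natural domain num_unlabeled ≥ 0: for num_unlabeled = -1 A raises
-- ZeroDivisionError, and for num_unlabeled ≤ -2 A raises IndexError/AssertionError except at the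
-- degenerate batch_size = 0, where A's returned [0] is an accident of the empty groups list.
def Pre_interleave_offsets (batch_size : Int) (num_unlabeled : Int) : Prop := 0 ≤ num_unlabeled
instance (batch_size : Int) (num_unlabeled : Int) : Decidable (Pre_interleave_offsets batch_size num_unlabeled) := by unfold Pre_interleave_offsets; infer_instance
def pvWitness_interleave_offsets : Int × Int := (7, 2)

def Spec_interleave_offsets (batch_size : Int) (num_unlabeled : Int) (out : List Int) : Prop := out = interleave_offsets_alt batch_size num_unlabeled
instance (batch_size : Int) (num_unlabeled : Int) (out : List Int) : Decidable (Spec_interleave_offsets batch_size num_unlabeled out) := by unfold Spec_interleave_offsets; infer_instance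

-- ===== CLAIM (what is proved, stated in full; the proofs are below) =====
def Claim_equal_interleave_offsets : Prop := ∀ (batch_size : Int) (num_unlabeled : Int), Dom_interleave_offsets batch_size num_unlabeled → Pre_interleave_offsets batch_size num_unlabeled → Spec_interleave_offsets batch_size num_unlabeled (interleave_offsets batch_size num_unlabeled)

-- ===== LEMMAS AND PROOFS =====

-- proof-side characterisation of A's offsets loop: cumulative sums from a start value
def csum (s : Int) : List Int → List Int
  | [] => []
  | g :: t => (s + g) :: csum (s + g) t

theorem getLast!_concat (xs : List Int) (x : Int) : (xs ++ [x]).getLast! = x := by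
  induction xs with
  | nil => rfl
  | cons a t ih =>
    cases t with
    | nil => rfl
    | cons b u => simpa [List.getLast!] using ih

theorem foldl_offsets (gs acc : List Int) (h : acc ≠ []) :
    gs.foldl (fun offsets g => offsets ++ [offsets.getLast! + g]) acc = acc ++ csum acc.getLast! gs := by
  induction gs generalizing acc with
  | nil => simp [csum]
  | cons g t ih =>
    simp only [List.foldl_cons, csum]
    rw [ih (acc ++ [acc.getLast! + g]) (by simp), getLast!_concat]
    simp

theorem csum_append (s : Int) (u v : List Int) :
    csum s (u ++ v) = csum s u ++ csum (s + u.sum) v := by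
  induction u generalizing s with
  | nil => simp [csum]
  | cons g t ih => simp [csum, ih, add_assoc]

theorem csum_replicate (s q : Int) (a : Nat) :
    csum s (List.replicate a q) = (List.range a).map (fun (i : Nat) => s + q * ((i : Int) + 1)) := by
  induction a generalizing s with
  | zero => simp [csum]
  | succ n ih =>
    rw [List.replicate_succ]
    simp only [csum, ih, List.range_succ_eq_map, List.map_cons, List.map_map]
    congr 1
    · ring
    · refine List.map_congr_left fun i _ => ?_
      simp [Function.comp]
      ring

theorem pySetD_neg_natCast (xs : List Int) (k : Nat) (v : Int) (h1 : 0 < k) (h2 : k ≤ xs.length) :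
    PySem.List.pySetD xs (-(k : Int)) v = xs.set (xs.length - k) v := by
  simp only [PySem.List.pySetD, PySem.List.pySet?, PySem.List.pyIdx?]
  rw [if_neg (by omega), if_pos (by omega)]
  simp

-- A's first loop: incrementing the last j entries of the groups list, one at a time
theorem incr_loop (q : Int) (M j : Nat) (h : j ≤ M) :
    (PySem.List.pyRange 0 (j : Int) 1).foldl
      (fun g x => PySem.List.pySetD g (-x - 1) (PySem.List.pyGetD g (-x - 1) 0 + 1))
      (List.replicate M q)
    = List.replicate (M - j) q ++ List.replicate j (q + 1) := by
  induction j with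
  | zero => simp [PySem.List.pyRange_one_eq_nil]
  | succ n ih =>
    have hr : PySem.List.pyRange 0 ((n + 1 : Nat) : Int) 1
        = PySem.List.pyRange 0 (n : Int) 1 ++ [(n : Int)] := by
      push_cast
      exact PySem.List.pyRange_one_succ_right (by omega)
    rw [hr, List.foldl_append, ih (by omega)]
    simp only [List.foldl_cons, List.foldl_nil]
    have hlen : (List.replicate (M - n) q ++ List.replicate n (q + 1)).length = M := by
      simp; omega
    have hidx : -(n : Int) - 1 = -(((n + 1 : Nat)) : Int) := by push_cast; ring
    rw [hidx, PySem.List.pyGetD_neg_natCast _ _ _ (by omega) (by rw [hlen]; omega),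
        pySetD_neg_natCast _ _ _ (by omega) (by omega)]
    simp only [List.length_append, List.length_replicate]
    have e1 : M - n + n - (n + 1) = M - (n + 1) := by omega
    simp only [e1]
    have hget : (List.replicate (M - n) q ++ List.replicate n (q + 1))[M - (n+1)]'(by simp; omega) = q := by
      rw [List.getElem_append_left (by simp; omega)]
      simp
    rw [hget]
    have hM : M - n = (M - (n + 1)) + 1 := by omega
    rw [hM, List.replicate_succ', List.append_assoc, List.set_append]
    simp [List.replicate_succ]

-- ===== VERDICT (by name: the statement is the Claim_ definition above) =====
theorem interleave_offsets_spec : Claim_equal_interleave_offsets := by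
  intro bs n _ hpre
  have hn : (0:Int) ≤ n := hpre
  unfold Spec_interleave_offsets interleave_offsets interleave_offsets_alt
  have hm : (0:Int) < n + 1 := by omega
  set q := PySem.Int.floordiv bs (n+1) with hq
  set r := PySem.Int.mod bs (n+1) with hrr
  have hr0 : 0 ≤ r := PySem.Int.mod_nonneg bs hm
  have hr1 : r < n + 1 := PySem.Int.mod_lt bs hm
  have hqr : q * (n+1) + r = bs := PySem.Int.floordiv_mul_add_mod bs (n+1)
  set M := (n + 1).toNat with hMdef
  set R := r.toNat with hRdef
  set a := M - R with hadef
  have hRM : R ≤ M := by omega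
  have hcastM : ((M : Nat) : Int) = n + 1 := by omega
  have hcastR : ((R : Nat) : Int) = r := by omega
  have hsum : (List.replicate M q).sum = (M : Int) * q := by
    simp [List.sum_replicate]
  have hrange : bs - (List.replicate M q).sum = ((R : Nat) : Int) := by
    rw [hsum, hcastM, hcastR]; linear_combination -hqr
  simp only [PySem.List.pyRepeat_singleton q (n+1), ← hq, ← hrr, ← hMdef, hrange]
  rw [incr_loop q M R hRM]
  rw [foldl_offsets _ _ (by simp)]
  have hL0 : ([0] : List Int).getLast! = 0 := rfl
  rw [hL0, csum_append, csum_replicate, csum_replicate]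
  have hsuma : (List.replicate (M - R) q).sum = ((a : Nat) : Int) * q := by
    simp [List.sum_replicate]; exact Or.inl rfl
  rw [hsuma]
  have hn2 : n + 2 = (((a + R + 1 : Nat)) : Int) := by omega
  rw [hn2, PySem.List.pyRange_zero_natCast, List.map_map]
  have hcut : n + 1 - r = ((a : Nat) : Int) := by omega
  rw [hcut]
  have hsplit : a + R + 1 = (a + 1) + R := by omega
  rw [hsplit, List.range_add, List.map_append, List.map_map, ← List.append_assoc]
  have hMR : M - R = a := rfl
  rw [hMR]
  congr 1
  · rw [List.range_succ_eq_map, List.map_cons, List.map_map]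
    simp
  · refine List.map_congr_left fun i hi => ?_
    simp only [List.mem_range] at hi
    simp only [Function.comp]
    rw [max_eq_right (by push_cast; omega)]
    push_cast
    ring
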